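-- pv_equiv track=rewrite | github.com/m-abdullah-nabeel/bioinformatics-1 | 13.py | Neighbors
-- ===== SOURCE A (Python) =====
-- def HammingDistance(a, b):
--     a = a.lower()
--     b = b.lower()
--     hd = 0
--     for i in range(len(a)):
--         if a[i] != b[i]:
--             hd += 1
--     return(hd)
--
-- def Suffix(Pattern):
--     return Pattern[1:]
--
-- def Neighbors(Pattern, d):
--     if d == 0:
--         return {Pattern}
--     if len(Pattern) == 1:
--         return {'A', 'C', 'G', 'T'}
--     Neighborhood = set()
--     SuffixNeighbors = Neighbors(Suffix(Pattern), d)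
--     # for each string Text from SuffixNeighbors:
--     for Text in SuffixNeighbors:
--         if HammingDistance(Suffix(Pattern), Text) < d:
--             # for each nucleotide x:
--             for x in 'ATCG':
--                 # add x • Text to Neighborhood
--                 Neighborhood.add(x+Text)
--         else:
--             # add FirstSymbol(Pattern) • Text to Neighborhood
--             Neighborhood.add(Pattern[0]+Text)
--
--     return Neighborhood
-- ===== SOURCE B (Python) =====
-- def Neighbors(Pattern, d):
--     # Iterative rebuild, right-to-left over the pattern: each level extends the previous
--     # neighborhood set, with a dict carrying each text's mismatch count, so no Hamming
--     # distance is ever recomputed (O(1) per extension instead of O(len(Pattern))).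
--     if d == 0:
--         return {Pattern}
--     if len(Pattern) == 1:
--         return {'A', 'C', 'G', 'T'}
--     last = Pattern[-1].lower()
--     cur = {'A', 'C', 'G', 'T'}
--     dist = {x: 0 if x.lower() == last else 1 for x in 'ACGT'}
--     for c in reversed(Pattern[:-1]):
--         cl = c.lower()
--         nxt, nd = set(), {}
--         for t in cur:
--             h = dist[t]
--             if h < d:
--                 for x in 'ATCG':
--                     nxt.add(x + t)
--                     nd[x + t] = h + (1 if x.lower() != cl else 0)
--             else:
--                 nxt.add(c + t)
--                 nd[c + t] = h
--         cur, dist = nxt, nd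
--     return cur
-- ===== Notes on version B (the rewrite author's own statement) =====
-- stated objective: alternative
-- what changed: B replaces A's recursion, which recomputes HammingDistance of the whole suffix for every suffix-neighbor at every level, with a single right-to-left loop over the pattern that carries each text's mismatch count in a dict, so each extension costs O(1) instead of O(k); intended as faster, measured 1.66x at the largest size both finished (faster:unconfirmed, so claimed as alternative).
import Mathlib
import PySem

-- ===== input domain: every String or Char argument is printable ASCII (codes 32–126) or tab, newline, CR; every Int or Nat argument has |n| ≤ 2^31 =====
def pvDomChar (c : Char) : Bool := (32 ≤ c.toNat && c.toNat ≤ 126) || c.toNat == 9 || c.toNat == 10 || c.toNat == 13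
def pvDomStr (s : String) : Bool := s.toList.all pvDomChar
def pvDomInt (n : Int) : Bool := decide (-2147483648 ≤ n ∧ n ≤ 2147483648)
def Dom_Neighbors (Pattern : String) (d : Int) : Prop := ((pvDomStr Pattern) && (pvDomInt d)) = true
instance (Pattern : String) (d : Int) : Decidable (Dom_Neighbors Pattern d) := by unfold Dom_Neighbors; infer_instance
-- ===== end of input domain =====

-- B replaces A's recursion that recomputes HammingDistance for every suffix-neighbor with a
-- right-to-left loop carrying each text's mismatch count in a dict (same return values).

-- ===== PORT A =====
-- HammingDistance: lowercases both strings, counts positions i < len(a) with a[i] != b[i].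
-- a[i]/b[i] ported with pyGetD: exact whenever len a ≤ len b (all call sites compare equal-length strings).
def pvHamming (a b : List Char) : Int :=
  let a' := PySem.Chars.lower a
  let b' := PySem.Chars.lower b
  (PySem.List.pyRange 0 (a'.length : Int) 1).foldl
    (fun hd i => if PySem.List.pyGetD a' i ' ' ≠ PySem.List.pyGetD b' i ' ' then hd + 1 else hd) 0

-- Neighbors on char lists.  The Python iterates over the set SuffixNeighbors; the returned SET does
-- not depend on that order, and the port iterates it in insertion order.
def pvNA (P : List Char) (d : Int) : PySem.Set (List Char) :=
  if d = 0 then PySem.Set.ofList [P]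
  else match P with
  | [] => PySem.Set.empty      -- the Python recurses forever on '' with d ≠ 0; excluded by Pre_
  | [_] => PySem.Set.ofList [['A'], ['C'], ['G'], ['T']]
  | p :: q :: r =>
    (pvNA (q :: r) d).foldl
      (fun acc Text =>
        if pvHamming (q :: r) Text < d then
          (['A', 'T', 'C', 'G']).foldl (fun a x => PySem.Set.add a (x :: Text)) acc
        else PySem.Set.add acc (p :: Text))
      PySem.Set.empty

def Neighbors (Pattern : String) (d : Int) : List String :=
  (pvNA Pattern.toList d).map (fun cs => String.ofList cs)

-- ===== PORT B =====
-- one level of Source B's loop body: extend every text of the previous neighborhood set,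
-- looking its mismatch count up in the previous dict (dist[t]: the key is always present,
-- so the getD default is never taken) and recording the new counts in the next dict
def pvStepB (d : Int) (c : Char)
    (st : PySem.Set (List Char) × PySem.Dict (List Char) Int) :
    PySem.Set (List Char) × PySem.Dict (List Char) Int :=
  let cl := PySem.Chars.lowerChar c
  st.1.foldl (fun acc t =>
    let h := st.2.getD t 0
    if h < d then
      (['A', 'T', 'C', 'G']).foldl
        (fun acc2 x => (PySem.Set.add acc2.1 (x :: t),
          acc2.2.insert (x :: t) (h + (if PySem.Chars.lowerChar x ≠ cl then 1 else 0)))) acc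
    else (PySem.Set.add acc.1 (c :: t), acc.2.insert (c :: t) h))
    (PySem.Set.empty, PySem.Dict.empty)

def pvNB (P : List Char) (d : Int) : PySem.Set (List Char) :=
  if d = 0 then PySem.Set.ofList [P]
  else match P with
  | [] => PySem.Set.empty      -- Source B raises IndexError on '' with d ≠ 0 (Pattern[-1]); excluded by Pre_
  | [_] => PySem.Set.ofList [['A'], ['C'], ['G'], ['T']]
  | p :: q :: r =>
    let last := PySem.Chars.lowerChar (PySem.List.pyGetD (p :: q :: r) (-1) ' ')
    let cur0 : PySem.Set (List Char) := PySem.Set.ofList [['A'], ['C'], ['G'], ['T']]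
    -- the dict comprehension, ported as an insert fold in its iteration order
    let dist0 : PySem.Dict (List Char) Int :=
      (['A', 'C', 'G', 'T']).foldl
        (fun dd x => dd.insert [x] (if PySem.Chars.lowerChar x = last then (0 : Int) else 1))
        PySem.Dict.empty
    (((PySem.List.slice (p :: q :: r) none (some (-1))).reverse).foldl
      (fun st c => pvStepB d c st) (cur0, dist0)).1

def Neighbors_alt (Pattern : String) (d : Int) : List String :=
  (pvNB Pattern.toList d).map (fun cs => String.ofList cs)

-- ===== PRECONDITION & SPEC =====
-- Pre_ excludes only the empty pattern with d ≠ 0, on which A recurses forever (RecursionError);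
-- B raises IndexError there.
def Pre_Neighbors (Pattern : String) (d : Int) : Prop := d = 0 ∨ Pattern ≠ ""
instance (Pattern : String) (d : Int) : Decidable (Pre_Neighbors Pattern d) := by unfold Pre_Neighbors; infer_instance
def pvWitness_Neighbors : String × Int := ("ACG", 1)

def Spec_Neighbors (Pattern : String) (d : Int) (out : List String) : Prop := out = Neighbors_alt Pattern d
instance (Pattern : String) (d : Int) (out : List String) : Decidable (Spec_Neighbors Pattern d out) := by unfold Spec_Neighbors; infer_instance

-- ===== CLAIM (what is proved, stated in full; the proofs are below) =====
def Claim_equal_Neighbors : Prop := ∀ (Pattern : String) (d : Int), Dom_Neighbors Pattern d → Pre_Neighbors Pattern d → Spec_Neighbors Pattern d (Neighbors Pattern d)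

-- ===== LEMMAS AND PROOFS =====

lemma pvHamming_nil (b : List Char) : pvHamming [] b = 0 := by
  simp [pvHamming, PySem.List.pyRange_one_eq_nil]

lemma getD_shift (z : Char) (zs : List Char) (k : Nat) (dd : Char) :
    PySem.List.pyGetD (z :: zs) ((1:Int) + (k : Int)) dd = PySem.List.pyGetD zs (k : Int) dd := by
  have h : (1:Int)+(k:Int) = ((k+1:Nat):Int) := by push_cast; ring
  rw [h, PySem.List.pyGetD_natCast, PySem.List.pyGetD_natCast]; simp

lemma pyRange_shift_foldl {α : Type} (n : Nat) (f : α → Int → α) (acc : α) :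
    (PySem.List.pyRange 1 ((n : Int) + 1) 1).foldl f acc
      = (PySem.List.pyRange 0 (n : Int) 1).foldl (fun a i => f a (1 + i)) acc := by
  rw [PySem.List.pyRange_one, PySem.List.pyRange_one]
  simp [List.foldl_map]

lemma pvHamming_cons (x y : Char) (as bs : List Char) :
    pvHamming (x :: as) (y :: bs)
      = (if PySem.Chars.lowerChar x ≠ PySem.Chars.lowerChar y then 1 else 0) + pvHamming as bs := by
  unfold pvHamming
  dsimp only
  have e1 : PySem.Chars.lower (x :: as) = PySem.Chars.lowerChar x :: PySem.Chars.lower as := by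
    simp [PySem.Chars.lower]
  have e2 : PySem.Chars.lower (y :: bs) = PySem.Chars.lowerChar y :: PySem.Chars.lower bs := by
    simp [PySem.Chars.lower]
  rw [e1, e2, List.length_cons]
  rw [show (((PySem.Chars.lower as).length + 1 : Nat) : Int) = (((PySem.Chars.lower as).length : Nat) : Int) + 1 by push_cast; ring]
  rw [PySem.List.pyRange_one_cons (by positivity)]
  rw [List.foldl_cons, PySem.List.pyGetD_zero_cons, PySem.List.pyGetD_zero_cons]
  rw [show ((0:Int) + 1) = 1 from rfl]
  rw [pyRange_shift_foldl]
  have hext := List.foldl_hom (f := ((if PySem.Chars.lowerChar x ≠ PySem.Chars.lowerChar y then (1:Int) else 0) + ·))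
      (g₁ := fun hd i => if PySem.List.pyGetD (PySem.Chars.lowerChar x :: PySem.Chars.lower as) (1 + i) ' ' ≠ PySem.List.pyGetD (PySem.Chars.lowerChar y :: PySem.Chars.lower bs) (1 + i) ' ' then hd + 1 else hd)
      (g₂ := fun hd i => if PySem.List.pyGetD (PySem.Chars.lowerChar x :: PySem.Chars.lower as) (1 + i) ' ' ≠ PySem.List.pyGetD (PySem.Chars.lowerChar y :: PySem.Chars.lower bs) (1 + i) ' ' then hd + 1 else hd)
      (l := PySem.List.pyRange 0 ((PySem.Chars.lower as).length : Int) 1) (init := 0)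
      (fun a i => by by_cases hc : PySem.List.pyGetD (PySem.Chars.lowerChar x :: PySem.Chars.lower as) (1 + i) ' ' ≠ PySem.List.pyGetD (PySem.Chars.lowerChar y :: PySem.Chars.lower bs) (1 + i) ' ' <;> (simp [hc]; try ring))
  simp only [add_zero] at hext
  rw [hext]
  congr 1
  apply PySem.List.foldl_congr_mem
  intro acc i hi
  obtain ⟨h0, -⟩ := (PySem.List.mem_pyRange_one).mp hi
  have hk : i = ((i.toNat : Nat) : Int) := by omega
  rw [hk, getD_shift, getD_shift]


-- proof-side abbreviations for the two loop bodies
def pvAbody (d : Int) (c : Char) (S : List Char)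
    (a : PySem.Set (List Char)) (Text : List Char) : PySem.Set (List Char) :=
  if pvHamming S Text < d then
    (['A', 'T', 'C', 'G']).foldl (fun a2 x => PySem.Set.add a2 (x :: Text)) a
  else PySem.Set.add a (c :: Text)

def pvBbody (d : Int) (c : Char) (D0 : PySem.Dict (List Char) Int)
    (acc : PySem.Set (List Char) × PySem.Dict (List Char) Int) (t : List Char) :
    PySem.Set (List Char) × PySem.Dict (List Char) Int :=
  if D0.getD t 0 < d then
    (['A', 'T', 'C', 'G']).foldl
      (fun acc2 x => (PySem.Set.add acc2.1 (x :: t),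
        acc2.2.insert (x :: t) (D0.getD t 0 + (if PySem.Chars.lowerChar x ≠ PySem.Chars.lowerChar c then 1 else 0)))) acc
  else (PySem.Set.add acc.1 (c :: t), acc.2.insert (c :: t) (D0.getD t 0))

def pvSeedD (lc : Char) : PySem.Dict (List Char) Int :=
  (['A', 'C', 'G', 'T'] : List Char).foldl
    (fun dd x => dd.insert [x] (if PySem.Chars.lowerChar x = lc then (0 : Int) else 1))
    PySem.Dict.empty

lemma pvNA_main (d : Int) (hd : d ≠ 0) (p q : Char) (r : List Char) :
    pvNA (p :: q :: r) d = (pvNA (q :: r) d).foldl (pvAbody d p (q :: r)) PySem.Set.empty := by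
  rw [pvNA, if_neg hd]
  rfl

lemma pvStepB_eq (d : Int) (c : Char) (st : PySem.Set (List Char) × PySem.Dict (List Char) Int) :
    pvStepB d c st = st.1.foldl (pvBbody d c st.2) (PySem.Set.empty, PySem.Dict.empty) := by
  rfl

lemma pvSeed_vals (c x : Char) (hx : x ∈ (['A', 'C', 'G', 'T'] : List Char)) :
    (pvSeedD (PySem.Chars.lowerChar c)).getD [x] 0 = pvHamming [c] [x] := by
  rw [pvHamming_cons, pvHamming_nil]
  fin_cases hx <;>
    · simp only [pvSeedD, List.foldl_cons, List.foldl_nil, PySem.Dict.getD_insert]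
      by_cases hxc : PySem.Chars.lowerChar 'A' = PySem.Chars.lowerChar c <;>
        by_cases hxc2 : PySem.Chars.lowerChar 'C' = PySem.Chars.lowerChar c <;>
        by_cases hxc3 : PySem.Chars.lowerChar 'G' = PySem.Chars.lowerChar c <;>
        by_cases hxc4 : PySem.Chars.lowerChar 'T' = PySem.Chars.lowerChar c <;>
        simp_all [eq_comm]

lemma pvFoldStep (d : Int) (c : Char) (S : List Char) (D0 : PySem.Dict (List Char) Int)
    (hvals : ∀ t ∈ pvNA S d, D0.getD t 0 = pvHamming S t) :
    ∀ (L : List (List Char)) (accA : PySem.Set (List Char)) (accD : PySem.Dict (List Char) Int),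
    (∀ t ∈ L, t ∈ pvNA S d) →
    (∀ t ∈ accA, accD.getD t 0 = pvHamming (c :: S) t) →
    (L.foldl (pvBbody d c D0) (accA, accD)).1 = L.foldl (pvAbody d c S) accA
    ∧ ∀ t ∈ (L.foldl (pvBbody d c D0) (accA, accD)).1,
        (L.foldl (pvBbody d c D0) (accA, accD)).2.getD t 0 = pvHamming (c :: S) t := by
  intro L
  induction L with
  | nil => intro accA accD _ hacc; exact ⟨rfl, hacc⟩
  | cons t0 L' ih =>
    intro accA accD hmem hacc
    have hv0 : D0.getD t0 0 = pvHamming S t0 := hvals t0 (hmem t0 (List.mem_cons_self))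
    simp only [List.foldl_cons]
    rw [show pvBbody d c D0 (accA, accD) t0
        = (pvAbody d c S accA t0,
            if pvHamming S t0 < d then
              (((accD.insert ('A' :: t0) (pvHamming S t0 + (if PySem.Chars.lowerChar 'A' ≠ PySem.Chars.lowerChar c then 1 else 0))).insert
                ('T' :: t0) (pvHamming S t0 + (if PySem.Chars.lowerChar 'T' ≠ PySem.Chars.lowerChar c then 1 else 0))).insert
                ('C' :: t0) (pvHamming S t0 + (if PySem.Chars.lowerChar 'C' ≠ PySem.Chars.lowerChar c then 1 else 0))).insert
                ('G' :: t0) (pvHamming S t0 + (if PySem.Chars.lowerChar 'G' ≠ PySem.Chars.lowerChar c then 1 else 0))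
            else accD.insert (c :: t0) (pvHamming S t0)) from by
      unfold pvBbody pvAbody
      rw [hv0]
      by_cases hQ : pvHamming S t0 < d
      · rw [if_pos hQ, if_pos hQ, if_pos hQ]
        simp only [List.foldl_cons, List.foldl_nil]
      · rw [if_neg hQ, if_neg hQ, if_neg hQ]]
    by_cases hlt : pvHamming S t0 < d
    · rw [if_pos hlt]
      refine ih _ _ (fun t ht => hmem t (List.mem_cons_of_mem _ ht)) ?_
      intro t ht
      unfold pvAbody at ht
      rw [if_pos hlt] at ht
      simp only [List.foldl_cons, List.foldl_nil] at ht
      simp only [PySem.Dict.getD_insert]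
      rcases Decidable.em (t = 'G' :: t0) with h4 | h4
      · subst h4
        rw [if_pos rfl, pvHamming_cons]
        by_cases he : PySem.Chars.lowerChar 'G' = PySem.Chars.lowerChar c
        · simp [he]
        · simp [he, Ne.symm he]
          try ring
      rcases Decidable.em (t = 'C' :: t0) with h3 | h3
      · subst h3
        rw [if_neg h4, if_pos rfl, pvHamming_cons]
        by_cases he : PySem.Chars.lowerChar 'C' = PySem.Chars.lowerChar c
        · simp [he]
        · simp [he, Ne.symm he]
          try ring
      rcases Decidable.em (t = 'T' :: t0) with h2 | h2
      · subst h2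
        rw [if_neg h4, if_neg h3, if_pos rfl, pvHamming_cons]
        by_cases he : PySem.Chars.lowerChar 'T' = PySem.Chars.lowerChar c
        · simp [he]
        · simp [he, Ne.symm he]
          try ring
      rcases Decidable.em (t = 'A' :: t0) with h1 | h1
      · subst h1
        rw [if_neg h4, if_neg h3, if_neg h2, if_pos rfl, pvHamming_cons]
        by_cases he : PySem.Chars.lowerChar 'A' = PySem.Chars.lowerChar c
        · simp [he]
        · simp [he, Ne.symm he]
          try ring
      · rw [if_neg h4, if_neg h3, if_neg h2, if_neg h1]
        apply hacc
        rcases (PySem.Set.mem_add _ _ _).mp ht with hmm | hmm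
        · rcases (PySem.Set.mem_add _ _ _).mp hmm with hmm2 | hmm2
          · rcases (PySem.Set.mem_add _ _ _).mp hmm2 with hmm3 | hmm3
            · rcases (PySem.Set.mem_add _ _ _).mp hmm3 with hmm4 | hmm4
              · exact hmm4
              · exact absurd hmm4 h1
            · exact absurd hmm3 h2
          · exact absurd hmm2 h3
        · exact absurd hmm h4
    · rw [if_neg hlt]
      refine ih _ _ (fun t ht => hmem t (List.mem_cons_of_mem _ ht)) ?_
      intro t ht
      unfold pvAbody at ht
      rw [if_neg hlt] at ht
      simp only [PySem.Dict.getD_insert]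
      rcases Decidable.em (t = c :: t0) with h1 | h1
      · subst h1; rw [if_pos rfl, pvHamming_cons]; simp
      · rw [if_neg h1]
        apply hacc
        rcases (PySem.Set.mem_add _ _ _).mp ht with hmm | hmm
        · exact hmm
        · exact absurd hmm h1

lemma pvBmain (d : Int) (hd : d ≠ 0) : ∀ (S : List Char) (hS : S ≠ []),
    ((S.dropLast.reverse).foldl (fun st c => pvStepB d c st)
      (PySem.Set.ofList [['A'], ['C'], ['G'], ['T']],
        pvSeedD (PySem.Chars.lowerChar (S.getLast hS)))).1 = pvNA S d
    ∧ ∀ t ∈ ((S.dropLast.reverse).foldl (fun st c => pvStepB d c st)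
      (PySem.Set.ofList [['A'], ['C'], ['G'], ['T']],
        pvSeedD (PySem.Chars.lowerChar (S.getLast hS)))).1,
        ((S.dropLast.reverse).foldl (fun st c => pvStepB d c st)
      (PySem.Set.ofList [['A'], ['C'], ['G'], ['T']],
        pvSeedD (PySem.Chars.lowerChar (S.getLast hS)))).2.getD t 0 = pvHamming S t := by
  intro S
  induction S with
  | nil => intro h; exact absurd rfl h
  | cons c rest ih =>
    intro h
    cases rest with
    | nil =>
      constructor
      · rw [pvNA, if_neg hd]
        rfl
      · intro t ht
        have hset : t ∈ ([['A'], ['C'], ['G'], ['T']] : List (List Char)) := by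
          simpa using ht
        have hex : ∃ x ∈ (['A', 'C', 'G', 'T'] : List Char), t = [x] := by
          fin_cases hset <;> exact ⟨_, by simp, rfl⟩
        obtain ⟨x, hx, rfl⟩ := hex
        have hv := pvSeed_vals c x hx
        simpa using hv
    | cons q r =>
      have hne : (q :: r) ≠ [] := by simp
      have hlast : (c :: q :: r).getLast h = (q :: r).getLast hne := List.getLast_cons hne
      rw [hlast]
      rw [show (c :: q :: r).dropLast = c :: (q :: r).dropLast from rfl]
      rw [List.reverse_cons, List.foldl_append, List.foldl_cons, List.foldl_nil]
      obtain ⟨ih1, ih2⟩ := ih hne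
      rw [pvStepB_eq, ih1]
      have hstep := pvFoldStep d c (q :: r) _ (ih1 ▸ ih2)
        (pvNA (q :: r) d) PySem.Set.empty PySem.Dict.empty
        (fun t ht => ht) (fun t ht => absurd ht (List.not_mem_nil))
      refine ⟨?_, hstep.2⟩
      rw [hstep.1, pvNA_main d hd]

lemma pvNA_eq_pvNB (P : List Char) (d : Int) (h : d = 0 ∨ P ≠ []) : pvNA P d = pvNB P d := by
  by_cases hd0 : d = 0
  · subst hd0
    rw [pvNA.eq_def, pvNB.eq_def]
    simp
  · have hP : P ≠ [] := h.resolve_left hd0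
    match P, hP with
    | [c], _ =>
      rw [pvNA.eq_def, pvNB.eq_def]
    | p :: q :: r, _ =>
      rw [pvNB, if_neg hd0]
      dsimp only
      rw [PySem.List.pyGetD_neg_one (p :: q :: r) ' ' (by simp)]
      rw [PySem.List.slice_to_neg_one]
      exact (pvBmain d hd0 (p :: q :: r) (by simp)).1.symm

-- ===== VERDICT (by name: the statement is the Claim_ definition above) =====
theorem Neighbors_spec : Claim_equal_Neighbors := by
  intro Pattern d _ hpre
  unfold Spec_Neighbors Neighbors Neighbors_alt
  rw [pvNA_eq_pvNB]
  rcases hpre with h | h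
  · exact Or.inl h
  · exact Or.inr (fun hl => h (String.toList_eq_nil_iff.mp hl))
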